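-- pv_equiv track=rewrite | github.com/karlmarxlive/game-of-life | life.py | next_board_state_no_death
-- ===== SOURCE A (Python) =====
-- DEAD = 0
--
-- ALIVE = 1
--
-- def dead_state(width: int, height: int) -> list:
--     state = [[] for _ in  range(height)]
--     for h in range(height):
--         for w in range(width):
--             state[h].append(0)
--     return state
--
-- def next_board_state_no_death(state: list) -> list:
--     rows = len(state)
--     cols = len(state[0])
--     new_state = dead_state(cols, rows)
--
--     for i in range(rows):
--         for j in range(cols):
--             neighbors = 0
--             for dy in (-1, 0, 1):
--                 for dx in (-1, 0, 1):
--                     if dx == 0 and dy == 0: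
--                         continue
--                     ni, nj = i + dy, j + dx
--                     if 0 <= ni < rows and 0 <= nj < cols:
--                         neighbors += state[ni][nj]
--
--             if state[i][j] == ALIVE:
--                 new_state[i][j] = ALIVE
--             if state[i][j] == DEAD:
--                 new_state[i][j] = ALIVE if neighbors == 3 else DEAD
--
--     return new_state
-- ===== SOURCE B (Python) =====
-- DEAD = 0
-- ALIVE = 1
--
-- def next_board_state_no_death(state: list) -> list:
--     rows = len(state)
--     cols = len(state[0])
--
--     def wsum(r):
--         # horizontal 3-window sums of one row, clamped to [0, cols)
--         return [(r[j - 1] if j > 0 else 0) + r[j] + (r[j + 1] if j + 1 < cols else 0)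
--                 for j in range(cols)]
--
--     win = [wsum(r) for r in state]
--     zero = [0] * cols
--
--     def new_row(i):
--         up = win[i - 1] if i > 0 else zero
--         dn = win[i + 1] if i + 1 < rows else zero
--         mid = win[i]
--         return [ALIVE if state[i][j] == ALIVE
--                 else (ALIVE if state[i][j] == DEAD
--                       and up[j] + mid[j] + dn[j] - state[i][j] == 3 else DEAD)
--                 for j in range(cols)]
--
--     return [new_row(i) for i in range(rows)]
-- ===== Notes on version B (the rewrite author's own statement) =====
-- stated objective: faster
-- what changed: Replaces the per-cell 3x3 double loop over offsets with a separable two-pass scheme: one pass precomputes clamped horizontal 3-window sums per row, then each cell's neighbor count is three window lookups minus the cell itself.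
import Mathlib
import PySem

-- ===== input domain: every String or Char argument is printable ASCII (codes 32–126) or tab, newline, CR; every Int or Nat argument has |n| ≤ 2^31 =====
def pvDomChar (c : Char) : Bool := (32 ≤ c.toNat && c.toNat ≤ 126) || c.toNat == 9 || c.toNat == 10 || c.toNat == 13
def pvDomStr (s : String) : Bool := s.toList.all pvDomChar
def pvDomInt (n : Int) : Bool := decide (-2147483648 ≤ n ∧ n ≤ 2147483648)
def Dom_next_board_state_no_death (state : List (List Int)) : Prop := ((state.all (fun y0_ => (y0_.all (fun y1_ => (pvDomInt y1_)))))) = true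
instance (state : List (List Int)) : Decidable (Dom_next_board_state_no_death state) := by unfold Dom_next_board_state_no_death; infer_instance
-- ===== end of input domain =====

-- B replaces A's per-cell 3x3 offset double loop with a separable two-pass scheme (per-row
-- clamped 3-window sums, then three window lookups minus the cell); measured constant-factor faster.


-- ===== PORT A =====

-- state[h].append(0) / new_state[i][j] = v : in-place element assignment, total form (in range under Pre_)
def pvSet2 (m : List (List Int)) (i j v : Int) : List (List Int) :=
  PySem.List.pySetD m i (PySem.List.pySetD (PySem.List.pyGetD m i []) j v)

def dead_state (width height : Int) : List (List Int) :=
  let state := (PySem.List.pyRange 0 height 1).map (fun _ => ([] : List Int))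
  (PySem.List.pyRange 0 height 1).foldl (fun st h =>
    (PySem.List.pyRange 0 width 1).foldl (fun st _w =>
      PySem.List.pySetD st h (PySem.List.pyGetD st h [] ++ [0])) st) state

def next_board_state_no_death (state : List (List Int)) : List (List Int) :=
  let rows : Int := PySem.List.len state
  let cols : Int := PySem.List.len (PySem.List.pyGetD state 0 [])
  let new0 := dead_state cols rows
  (PySem.List.pyRange 0 rows 1).foldl (fun ns i =>
    (PySem.List.pyRange 0 cols 1).foldl (fun ns j =>
      let neighbors : Int :=
        ([-1, 0, 1] : List Int).foldl (fun acc dy =>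
          ([-1, 0, 1] : List Int).foldl (fun acc dx =>
            if dx = 0 ∧ dy = 0 then acc
            else
              if 0 ≤ i + dy ∧ i + dy < rows ∧ 0 ≤ j + dx ∧ j + dx < cols then
                acc + PySem.List.pyGetD (PySem.List.pyGetD state (i + dy) []) (j + dx) 0
              else acc) acc) 0
      let c := PySem.List.pyGetD (PySem.List.pyGetD state i []) j 0
      let ns1 := if c = 1 then pvSet2 ns i j 1 else ns
      if c = 0 then pvSet2 ns1 i j (if neighbors = 3 then 1 else 0) else ns1) ns) new0

-- ===== PORT B =====

-- horizontal clamped 3-window sums of one row (Source B's wsum)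
def pvWsum (cols : Int) (r : List Int) : List Int :=
  (PySem.List.pyRange 0 cols 1).map (fun j =>
    (if 0 < j then PySem.List.pyGetD r (j - 1) 0 else 0) + PySem.List.pyGetD r j 0 +
    (if j + 1 < cols then PySem.List.pyGetD r (j + 1) 0 else 0))

def next_board_state_no_death_alt (state : List (List Int)) : List (List Int) :=
  let rows : Int := PySem.List.len state
  let cols : Int := PySem.List.len (PySem.List.pyGetD state 0 [])
  let win := state.map (pvWsum cols)
  let zero : List Int := List.replicate cols.toNat 0
  (PySem.List.pyRange 0 rows 1).map (fun i =>
    let up := if 0 < i then PySem.List.pyGetD win (i - 1) [] else zero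
    let dn := if i + 1 < rows then PySem.List.pyGetD win (i + 1) [] else zero
    let mid := PySem.List.pyGetD win i []
    (PySem.List.pyRange 0 cols 1).map (fun j =>
      let c := PySem.List.pyGetD (PySem.List.pyGetD state i []) j 0
      if c = 1 then 1
      else if c = 0 ∧ PySem.List.pyGetD up j 0 + PySem.List.pyGetD mid j 0 + PySem.List.pyGetD dn j 0 - c = 3 then 1
      else 0))

-- ===== PRECONDITION & SPEC =====
-- Pre_ excludes exactly the inputs where Python A raises IndexError: the empty board (state[0])
-- and ragged boards with a row shorter than the first row (state[ni][nj] out of range).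
def Pre_next_board_state_no_death (state : List (List Int)) : Prop :=
  state ≠ [] ∧ ∀ r ∈ state, (state.getD 0 []).length ≤ r.length

instance (state : List (List Int)) : Decidable (Pre_next_board_state_no_death state) := by
  unfold Pre_next_board_state_no_death; infer_instance

def pvWitness_next_board_state_no_death : List (List Int) := [[0, 1], [1, 0]]

def Spec_next_board_state_no_death (state : List (List Int)) (out : List (List Int)) : Prop :=
  out = next_board_state_no_death_alt state
instance (state : List (List Int)) (out : List (List Int)) : Decidable (Spec_next_board_state_no_death state out) := by
  unfold Spec_next_board_state_no_death; infer_instance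

-- ===== CLAIM (what is proved, stated in full; the proofs are below) =====
def Claim_equal_next_board_state_no_death : Prop := ∀ (state : List (List Int)), Dom_next_board_state_no_death state → Pre_next_board_state_no_death state → Spec_next_board_state_no_death state (next_board_state_no_death state)

-- ===== LEMMAS AND PROOFS =====

-- state[a][b] read with Int indices (total form, in range wherever used)
def pvV (state : List (List Int)) (a b : Int) : Int :=
  PySem.List.pyGetD (PySem.List.pyGetD state a []) b 0

-- A's neighbor count at (i, j)
def pvNbrA (state : List (List Int)) (rows cols i j : Int) : Int :=
  ([-1, 0, 1] : List Int).foldl (fun acc dy =>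
    ([-1, 0, 1] : List Int).foldl (fun acc dx =>
      if dx = 0 ∧ dy = 0 then acc
      else
        if 0 ≤ i + dy ∧ i + dy < rows ∧ 0 ≤ j + dx ∧ j + dx < cols then
          acc + pvV state (i + dy) (j + dx)
        else acc) acc) 0

-- the value A writes at (i, j) (when it writes at all)
def pvValA (state : List (List Int)) (rows cols i j : Int) : Int :=
  if pvV state i j = 0 then (if pvNbrA state rows cols i j = 3 then 1 else 0) else 1

-- the final cell of A's board at (i, j)
def pvCellA (state : List (List Int)) (rows cols i j : Int) : Int :=
  if pvV state i j = 0 ∨ pvV state i j = 1 then pvValA state rows cols i j else 0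

theorem pvRangeNat (n : Nat) :
    PySem.List.pyRange 0 (n : Int) 1 = (List.range n).map (fun k : Nat => (k : Int)) := by
  rw [PySem.List.pyRange_one]
  simp

-- m with m[i] re-assigned its own value is m
theorem pvSetSelf {β : Type} (m : List β) (i : Nat) (d : β) (hi : i < m.length) :
    m.set i (m.getD i d) = m := by
  apply List.ext_getElem?
  intro k
  by_cases hk : k = i
  · subst hk
    simp [List.getElem?_eq_getElem hi]
  · simp [List.getElem?_set_ne (by omega : i ≠ k)]

-- a fold whose every step re-assigns slot i commutes into a fold on that slot's value
theorem pvFoldInner {β γ : Type} (d : β) (i : Nat) (F : β → γ → β)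
    (body : List β → γ → List β)
    (hbody : ∀ ns j, i < ns.length → body ns j = ns.set i (F (ns.getD i d) j)) :
    ∀ (js : List γ) (m : List β), i < m.length →
      js.foldl body m = m.set i (js.foldl F (m.getD i d)) := by
  intro js
  induction js with
  | nil =>
      intro m hi
      simp only [List.foldl_nil]
      exact (pvSetSelf m i d hi).symm
  | cons j js ih =>
      intro m hi
      simp only [List.foldl_cons]
      rw [hbody m j hi, ih _ (by simpa using hi)]
      rw [List.set_set]
      congr 1
      simp [List.getD_eq_getElem?_getD, List.getElem?_set_self hi]

-- fold of slot assignments over range n, starting from a replicate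
theorem pvFoldMat {β : Type} (d z : β) (g : Nat → β → β) (S : List β → Nat → List β)
    (hS : ∀ m j, j < m.length → S m j = m.set j (g j (m.getD j d))) (N : Nat) :
    ∀ n, n ≤ N →
      (List.range n).foldl S (List.replicate N z)
        = (List.range n).map (fun k => g k z) ++ List.replicate (N - n) z := by
  intro n
  induction n with
  | zero => intro _; simp
  | succ n ih =>
      intro hn
      rw [List.range_succ, List.foldl_append, List.map_append, ih (by omega)]
      have hlen : (((List.range n).map fun k => g k z) ++ List.replicate (N - n) z).length = N := by
        simp; omega
      have hmlen : ((List.range n).map fun k => g k z).length = n := by simp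
      have hNn : N - n = (N - (n + 1)) + 1 := by omega
      rw [hNn, List.replicate_succ]
      simp only [List.foldl_cons, List.foldl_nil]
      rw [hS _ n (by simp)]
      have hgd : (((List.range n).map fun k => g k z) ++ z :: List.replicate (N - (n + 1)) z).getD n d = z := by
        rw [List.getD_eq_getElem?_getD, List.getElem?_append_right (by simp), hmlen]
        simp
      rw [hgd, List.set_append_right n (g n z) (by rw [hmlen])]
      simp [hmlen]

-- repeated appends of [0]
theorem pvAppendFold {γ : Type} : ∀ (js : List γ) (r : List Int),
    js.foldl (fun r _ => r ++ [0]) r = r ++ List.replicate js.length 0 := by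
  intro js
  induction js with
  | nil => simp
  | cons j js ih =>
      intro r
      simp [ih, List.append_assoc, List.replicate_succ]

theorem pvDeadState (w h : Nat) :
    dead_state (w : Int) (h : Int) = List.replicate h (List.replicate w 0) := by
  have hstep : ∀ (st : List (List Int)) (k : Nat), k < st.length →
      (PySem.List.pyRange 0 (w : Int) 1).foldl
          (fun st _ => PySem.List.pySetD st (k : Int) (PySem.List.pyGetD st (k : Int) [] ++ [0])) st
        = st.set k (st.getD k [] ++ List.replicate w 0) := by
    intro st k hk
    rw [pvFoldInner ([] : List Int) k (fun r (_ : Int) => r ++ [0]) _ (by intro ns j _; simp) _ st hk]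
    rw [pvAppendFold]
    simp [PySem.List.length_pyRange_one]
  unfold dead_state
  rw [List.map_const']
  have hlen : (PySem.List.pyRange 0 (h : Int) 1).length = h := by
    simp [PySem.List.length_pyRange_one]
  rw [hlen, pvRangeNat h, List.foldl_map]
  rw [pvFoldMat ([] : List Int) ([] : List Int) (fun _ r => r ++ List.replicate w 0)
        (fun st k => (PySem.List.pyRange 0 (w : Int) 1).foldl
          (fun st _ => PySem.List.pySetD st (k : Int) (PySem.List.pyGetD st (k : Int) [] ++ [0])) st)
        (fun m j hj => hstep m j hj) h h le_rfl]
  simp [List.map_const']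

-- A's row-update step at row i, as a pure function of the row
def pvRowF (state : List (List Int)) (rows cols : Int) (i : Nat) (r : List Int) (j : Nat) : List Int :=
  if pvV state (i : Int) (j : Int) = 0 ∨ pvV state (i : Int) (j : Int) = 1 then
    r.set j (pvValA state rows cols (i : Int) (j : Int))
  else r

theorem pvA_eq (state : List (List Int)) :
    next_board_state_no_death state
      = (List.range state.length).map (fun (i : Nat) =>
          (List.range (state.getD 0 []).length).map (fun (j : Nat) =>
            pvCellA state (state.length : Int) (((state.getD 0 []).length : Nat) : Int) (i : Int) (j : Int))) := by
  simp only [next_board_state_no_death, PySem.List.len_eq, PySem.List.pyGetD_zero]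
  rw [pvDeadState]
  simp only [pvRangeNat, List.foldl_map]
  have hrow : ∀ i : Nat,
      (List.range (state.getD 0 []).length).foldl
          (pvRowF state (state.length : Int) (((state.getD 0 []).length : Nat) : Int) i)
          (List.replicate (state.getD 0 []).length 0)
        = (List.range (state.getD 0 []).length).map (fun (j : Nat) =>
            pvCellA state (state.length : Int) (((state.getD 0 []).length : Nat) : Int) (i : Int) (j : Int)) := by
    intro i
    rw [pvFoldMat (0 : Int) (0 : Int)
      (fun j r0 => if pvV state (i : Int) (j : Int) = 0 ∨ pvV state (i : Int) (j : Int) = 1 then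
          pvValA state (state.length : Int) (((state.getD 0 []).length : Nat) : Int) (i : Int) (j : Int) else r0)
      (pvRowF state (state.length : Int) (((state.getD 0 []).length : Nat) : Int) i)
      (by
        intro r j hjr
        unfold pvRowF
        by_cases hc : pvV state (i : Int) (j : Int) = 0 ∨ pvV state (i : Int) (j : Int) = 1
        · simp only [if_pos hc]
        · simp only [if_neg hc]
          exact (pvSetSelf r j 0 hjr).symm)
      (state.getD 0 []).length (state.getD 0 []).length le_rfl]
    simp only [pvCellA, Nat.sub_self, List.replicate_zero, List.append_nil]
  refine (pvFoldMat ([] : List Int) (List.replicate (state.getD 0 []).length (0 : Int))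
      (fun i z0 => (List.range (state.getD 0 []).length).foldl
        (pvRowF state (state.length : Int) (((state.getD 0 []).length : Nat) : Int) i) z0)
      _ ?_ state.length state.length le_rfl).trans ?_
  · intro m i him
    refine pvFoldInner ([] : List Int) i _ _ ?_ _ m him
    intro ns j hj
    unfold pvRowF pvValA pvNbrA pvV pvSet2
    simp only [PySem.List.pySetD_natCast, PySem.List.pyGetD_natCast]
    by_cases hc0 : (state[i]?.getD ([] : List Int))[j]?.getD (0 : Int) = 0
    · simp [hc0]
    · by_cases hc1 : (state[i]?.getD ([] : List Int))[j]?.getD (0 : Int) = 1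
      · simp [hc1]
      · have hself := pvSetSelf ns i [] hj
        simp only [List.getD_eq_getElem?_getD] at hself
        simp [hc0, hc1, hself]
  · simp only [Nat.sub_self, List.replicate_zero, List.append_nil, hrow]

-- B's window sums, as scalar functions (Int indices)
def pvW (state : List (List Int)) (cols a j : Int) : Int :=
  (if 0 < j then pvV state a (j - 1) else 0) + pvV state a j +
  (if j + 1 < cols then pvV state a (j + 1) else 0)

def pvWC (state : List (List Int)) (rows cols a j : Int) : Int :=
  if 0 ≤ a ∧ a < rows then pvW state cols a j else 0

-- the final cell of B's board at (i, j)
def pvCellB (state : List (List Int)) (rows cols i j : Int) : Int :=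
  if pvV state i j = 1 then 1
  else if pvV state i j = 0 ∧
      pvWC state rows cols (i - 1) j + pvW state cols i j + pvWC state rows cols (i + 1) j
        - pvV state i j = 3 then 1
  else 0

theorem pvWinRow (state : List (List Int)) (a : Nat) (ha : a < state.length) :
    PySem.List.pyGetD (List.map (pvWsum (((state.getD 0 []).length : Nat) : Int)) state) (a : Int) []
      = pvWsum (((state.getD 0 []).length : Nat) : Int) (state.getD a []) := by
  rw [PySem.List.pyGetD_natCast, List.getD_eq_getElem _ _ (by simpa using ha), List.getElem_map,
      List.getD_eq_getElem _ _ ha]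

theorem pvWsumEntry (state : List (List Int)) (r : List Int) (j : Nat)
    (hj : j < (state.getD 0 []).length) :
    PySem.List.pyGetD (pvWsum (((state.getD 0 []).length : Nat) : Int) r) (j : Int) 0
      = (if 0 < (j : Int) then PySem.List.pyGetD r ((j : Int) - 1) 0 else 0)
          + PySem.List.pyGetD r (j : Int) 0
          + (if (j : Int) + 1 < (((state.getD 0 []).length : Nat) : Int) then PySem.List.pyGetD r ((j : Int) + 1) 0 else 0) := by
  unfold pvWsum
  exact PySem.List.pyGetD_map_pyRange _ _ j 0 hj

theorem pvMidEntry (state : List (List Int)) (i j : Nat) (hi : i < state.length)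
    (hj : j < (state.getD 0 []).length) :
    PySem.List.pyGetD
        (PySem.List.pyGetD (List.map (pvWsum (((state.getD 0 []).length : Nat) : Int)) state) (i : Int) [])
        (j : Int) 0
      = pvW state (((state.getD 0 []).length : Nat) : Int) (i : Int) (j : Int) := by
  rw [pvWinRow state i hi, pvWsumEntry state _ j hj]
  unfold pvW pvV
  simp [PySem.List.pyGetD_natCast]

theorem pvUpEntry (state : List (List Int)) (i j : Nat) (hi : i < state.length)
    (hj : j < (state.getD 0 []).length) :
    PySem.List.pyGetD
        (if 0 < (i : Int) then
            PySem.List.pyGetD (List.map (pvWsum (((state.getD 0 []).length : Nat) : Int)) state) ((i : Int) - 1) []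
          else List.replicate ((((state.getD 0 []).length : Nat) : Int)).toNat 0)
        (j : Int) 0
      = pvWC state (state.length : Int) (((state.getD 0 []).length : Nat) : Int) ((i : Int) - 1) (j : Int) := by
  by_cases hi0 : (0 : Int) < (i : Int)
  · rw [if_pos hi0]
    have hg2 : i - 1 < state.length := by omega
    have hcast : ((i : Int) - 1) = ((i - 1 : Nat) : Int) := by omega
    rw [hcast, pvWinRow state (i - 1) hg2, pvWsumEntry state _ j hj]
    unfold pvWC pvW pvV
    rw [if_pos (⟨by omega, by omega⟩ :
      (0 : Int) ≤ ((i - 1 : Nat) : Int) ∧ ((i - 1 : Nat) : Int) < (state.length : Int))]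
    simp [PySem.List.pyGetD_natCast]
  · rw [if_neg hi0]
    unfold pvWC
    rw [if_neg (by omega)]
    simp [PySem.List.pyGetD_natCast]

theorem pvDnEntry (state : List (List Int)) (i j : Nat) (hi : i < state.length)
    (hj : j < (state.getD 0 []).length) :
    PySem.List.pyGetD
        (if (i : Int) + 1 < (state.length : Int) then
            PySem.List.pyGetD (List.map (pvWsum (((state.getD 0 []).length : Nat) : Int)) state) ((i : Int) + 1) []
          else List.replicate ((((state.getD 0 []).length : Nat) : Int)).toNat 0)
        (j : Int) 0
      = pvWC state (state.length : Int) (((state.getD 0 []).length : Nat) : Int) ((i : Int) + 1) (j : Int) := by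
  by_cases hlt : (i : Int) + 1 < (state.length : Int)
  · rw [if_pos hlt]
    have hg2 : i + 1 < state.length := by omega
    have hcast : ((i : Int) + 1) = ((i + 1 : Nat) : Int) := by omega
    rw [hcast, pvWinRow state (i + 1) hg2, pvWsumEntry state _ j hj]
    unfold pvWC pvW pvV
    rw [if_pos (⟨by omega, by omega⟩ :
      (0 : Int) ≤ ((i + 1 : Nat) : Int) ∧ ((i + 1 : Nat) : Int) < (state.length : Int))]
    simp only [PySem.List.pyGetD_natCast]
  · rw [if_neg hlt]
    unfold pvWC
    rw [if_neg (by omega)]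
    simp [PySem.List.pyGetD_natCast]

theorem pvB_eq (state : List (List Int)) :
    next_board_state_no_death_alt state
      = (List.range state.length).map (fun (i : Nat) =>
          (List.range (state.getD 0 []).length).map (fun (j : Nat) =>
            pvCellB state (state.length : Int) (((state.getD 0 []).length : Nat) : Int) (i : Int) (j : Int))) := by
  simp only [next_board_state_no_death_alt, PySem.List.len_eq, PySem.List.pyGetD_zero]
  simp only [pvRangeNat, List.map_map]
  apply List.map_congr_left
  intro i hi
  rw [List.mem_range] at hi
  simp only [Function.comp]
  apply List.map_congr_left
  intro j hj
  rw [List.mem_range] at hj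
  simp only [Function.comp]
  rw [pvUpEntry state i j hi hj, pvMidEntry state i j hi hj, pvDnEntry state i j hi hj]
  unfold pvCellB pvV
  rfl

theorem pvGuardAdd (P : Prop) [Decidable P] (a b : Int) :
    (if P then a + b else a) = a + (if P then b else 0) := by
  split <;> simp

theorem pvIfDistrib (P : Prop) [Decidable P] (x y z : Int) :
    (if P then x + y + z else 0)
      = (if P then x else 0) + (if P then y else 0) + (if P then z else 0) := by
  split <;> simp

theorem pvIfIf (P Q : Prop) [Decidable P] [Decidable Q] (a : Int) :
    (if P then (if Q then a else 0) else 0) = if P ∧ Q then a else 0 := by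
  by_cases hP : P <;> by_cases hQ : Q <;> simp [hP, hQ]

-- A's 8-neighbor sum equals B's three window sums minus the center
theorem pvNbr_eq (state : List (List Int)) (rows cols i j : Int)
    (hi0 : 0 ≤ i) (hi : i < rows) (hj0 : 0 ≤ j) (hj : j < cols) :
    pvNbrA state rows cols i j
      = pvWC state rows cols (i - 1) j + pvW state cols i j + pvWC state rows cols (i + 1) j
          - pvV state i j := by
  have hsub : ∀ x : Int, x - 1 = x + -1 := fun x => sub_eq_add_neg x 1
  have e1 : (if 1 ≤ i ∧ i ≤ rows ∧ 1 ≤ j ∧ j ≤ cols then pvV state (i + -1) (j + -1) else 0)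
      = (if (1 ≤ i ∧ i ≤ rows) ∧ 0 < j then pvV state (i - 1) (j - 1) else 0) :=
    if_congr (by omega) (by rw [hsub i, hsub j]) rfl
  have e2 : (if 1 ≤ i ∧ i ≤ rows ∧ 0 ≤ j ∧ j < cols then pvV state (i + -1) j else 0)
      = (if 1 ≤ i ∧ i ≤ rows then pvV state (i - 1) j else 0) :=
    if_congr (by omega) (by rw [hsub i]) rfl
  have e3 : (if 1 ≤ i ∧ i ≤ rows ∧ 0 ≤ j + 1 ∧ j + 1 < cols then pvV state (i + -1) (j + 1) else 0)
      = (if (1 ≤ i ∧ i ≤ rows) ∧ j + 1 < cols then pvV state (i - 1) (j + 1) else 0) :=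
    if_congr (by omega) (by rw [hsub i]) rfl
  have e4 : (if 0 ≤ i ∧ i < rows ∧ 1 ≤ j ∧ j ≤ cols then pvV state i (j + -1) else 0)
      = (if 0 < j then pvV state i (j - 1) else 0) :=
    if_congr (by omega) (by rw [hsub j]) rfl
  have e5 : (if 0 ≤ i ∧ i < rows ∧ 0 ≤ j + 1 ∧ j + 1 < cols then pvV state i (j + 1) else 0)
      = (if j + 1 < cols then pvV state i (j + 1) else 0) :=
    if_congr (by omega) rfl rfl
  have e6 : (if 0 ≤ i + 1 ∧ i + 1 < rows ∧ 1 ≤ j ∧ j ≤ cols then pvV state (i + 1) (j + -1) else 0)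
      = (if (0 ≤ i + 1 ∧ i + 1 < rows) ∧ 0 < j then pvV state (i + 1) (j - 1) else 0) :=
    if_congr (by omega) (by rw [hsub j]) rfl
  have e7 : (if 0 ≤ i + 1 ∧ i + 1 < rows ∧ 0 ≤ j ∧ j < cols then pvV state (i + 1) j else 0)
      = (if 0 ≤ i + 1 ∧ i + 1 < rows then pvV state (i + 1) j else 0) :=
    if_congr (by omega) rfl rfl
  have e8 : (if 0 ≤ i + 1 ∧ i + 1 < rows ∧ 0 ≤ j + 1 ∧ j + 1 < cols then pvV state (i + 1) (j + 1) else 0)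
      = (if (0 ≤ i + 1 ∧ i + 1 < rows) ∧ j + 1 < cols then pvV state (i + 1) (j + 1) else 0) :=
    if_congr (by omega) rfl rfl
  unfold pvNbrA pvWC pvW
  norm_num [pvGuardAdd, pvIfDistrib, pvIfIf]
  rw [e1, e2, e3, e4, e5, e6, e7, e8]
  ring

-- pointwise: A's cell equals B's cell
theorem pvCell_eq (state : List (List Int)) (rows cols i j : Int)
    (hi0 : 0 ≤ i) (hi : i < rows) (hj0 : 0 ≤ j) (hj : j < cols) :
    pvCellA state rows cols i j = pvCellB state rows cols i j := by
  unfold pvCellA pvCellB pvValA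
  rw [pvNbr_eq state rows cols i j hi0 hi hj0 hj]
  by_cases h0 : pvV state i j = 0 <;> by_cases h1 : pvV state i j = 1 <;>
    simp [h0, h1]

theorem next_board_state_no_death_spec : Claim_equal_next_board_state_no_death := by
  intro state _ _
  unfold Spec_next_board_state_no_death
  rw [pvA_eq, pvB_eq]
  apply List.map_congr_left
  intro i hi
  rw [List.mem_range] at hi
  apply List.map_congr_left
  intro j hj
  rw [List.mem_range] at hj
  exact pvCell_eq state _ _ _ _ (Int.natCast_nonneg i) (by exact_mod_cast hi)
    (Int.natCast_nonneg j) (by exact_mod_cast hj)
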